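-- pv_equiv track=rewrite | github.com/Arty-Facts/CompetitivePrograming | happyprime/happyprime.py | happy_primes
-- ===== SOURCE A (Python) =====
-- def is_happy(number):
--     seen_numbers = set()
--     while number > 1 and (number not in seen_numbers):
--         seen_numbers.add(number)
--         number = sum(map(lambda x: int(x)**2 , list(str(number))))
--     return number == 1
--
-- def happy_primes(n):
--     prime = [True for i in range(n+1)]
--     prime[1] = False
--     prime[0] = False
--     p = 2
--     while (p * p <= n):
--         if (prime[p] == True):
--             for i in range(p * 2, n+1, p):
--                 prime[i] = False
--         p += 1
--
--     for i, p in enumerate(prime):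
--         if p and not is_happy(i):
--             prime[i] = False
--     return prime
-- ===== SOURCE B (Python) =====
-- def is_happy(number):
--     seen_numbers = set()
--     while number > 1 and (number not in seen_numbers):
--         seen_numbers.add(number)
--         number = sum(map(lambda x: int(x)**2 , list(str(number))))
--     return number == 1
--
-- def _is_prime(i):
--     d = 2
--     while d * d <= i:
--         if i % d == 0:
--             return False
--         d += 1
--     return True
--
-- def happy_primes(n):
--     prime = [True] * (n + 1)
--     prime[1] = False
--     prime[0] = False
--     for i in range(2, n + 1):
--         prime[i] = _is_prime(i) and is_happy(i)
--     return prime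
-- ===== Notes on version B (the rewrite author's own statement) =====
-- stated objective: alternative
-- what changed: Replaces the sieve of Eratosthenes (multiple-marking of composites followed by a separate happiness pass over enumerate) by a single pass that decides each i independently with trial division up to sqrt(i) combined directly with the happiness test.
import Mathlib
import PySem

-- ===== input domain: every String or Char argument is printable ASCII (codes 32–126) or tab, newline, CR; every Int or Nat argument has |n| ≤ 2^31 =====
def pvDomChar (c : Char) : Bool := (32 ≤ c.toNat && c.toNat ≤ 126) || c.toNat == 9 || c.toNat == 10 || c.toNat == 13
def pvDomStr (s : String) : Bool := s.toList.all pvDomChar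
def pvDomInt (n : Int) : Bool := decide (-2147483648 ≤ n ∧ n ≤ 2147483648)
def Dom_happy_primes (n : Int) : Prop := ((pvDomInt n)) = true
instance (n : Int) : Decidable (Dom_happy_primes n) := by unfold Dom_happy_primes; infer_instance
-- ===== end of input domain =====

-- B replaces A's sieve of Eratosthenes (multiple-marking plus a separate happiness pass) by a
-- single pass deciding each number independently by trial division up to √i; a different
-- algorithm, not claimed faster.

-- ===== PORT A =====

-- shared helper: both Source A and Source B contain this exact is_happy
-- digit-square sum: sum(map(lambda x: int(x)**2, list(str(number)))); `.getD 0` is a totality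
-- guard only (every char of str(number) is a digit for the numbers reached, which are > 1)
def digitSqSum (number : Int) : Int :=
  ((PySem.Int.toChars number).map (fun x => ((PySem.Int.ofChars? [x]).getD 0) ^ 2)).sum

-- the while loop of is_happy; the fuel is a totality guard only: each iteration adds a fresh
-- number to `seen` and after one step every value is < 811, so 2000 steps are never exhausted
-- on the |int| ≤ 2^31 domain
def isHappyLoop : Nat → Int → PySem.Set Int → Bool
  | 0, number, _ => number == 1
  | fuel + 1, number, seen =>
      if number > 1 && !(PySem.Set.contains seen number) then
        isHappyLoop fuel (digitSqSum number) (PySem.Set.add seen number)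
      else
        number == 1

def is_happy (number : Int) : Bool := isHappyLoop 2000 number PySem.Set.empty

-- [True for i in range(n+1)]; prime[1] = False; prime[0] = False
-- (Python raises IndexError when n < 1: excluded by Pre_)
def initPrimes (n : Int) : List Bool :=
  ((PySem.List.pyRange 0 (n + 1) 1).map (fun _ => true)).set 1 false |>.set 0 false

-- inner `for i in range(p*2, n+1, p): prime[i] = False` (i is always ≥ 0 here, so .toNat is exact)
def sieveMark (n p : Int) (prime : List Bool) : List Bool :=
  (PySem.List.pyRange (p * 2) (n + 1) p).foldl (fun pr i => pr.set i.toNat false) prime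

-- `while p*p <= n: if prime[p] == True: mark multiples; p += 1`
def sieveLoop (n p : Int) (prime : List Bool) : List Bool :=
  if h : p * p ≤ n then
    sieveLoop n (p + 1) (if prime.getD p.toNat false then sieveMark n p prime else prime)
  else prime
termination_by (n + 1 - p).toNat
decreasing_by
  have h1 : 2 * p - 1 ≤ n := by nlinarith [sq_nonneg (p - 1)]
  have h0 : 0 ≤ n := le_trans (mul_self_nonneg p) h
  omega

-- for i, p in enumerate(prime): if p and not is_happy(i): prime[i] = False
-- (exact over the snapshot: step i writes only index i, so every item the iterator yields is unchanged)
def happyPass (prime : List Bool) : List Bool :=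
  (PySem.List.enumerate prime 0).foldl
    (fun pr ip => if ip.2 && !is_happy ip.1 then pr.set ip.1.toNat false else pr) prime

def happy_primes (n : Int) : List Bool := happyPass (sieveLoop n 2 (initPrimes n))

-- ===== PORT B =====

-- _is_prime: `d = 2; while d*d <= i: if i % d == 0: return False; d += 1; return True`
def trialLoop (i d : Int) : Bool :=
  if h : d * d ≤ i then
    if PySem.Int.mod i d == 0 then false else trialLoop i (d + 1)
  else true
termination_by (i + 1 - d).toNat
decreasing_by
  have h1 : 2 * d - 1 ≤ i := by nlinarith [sq_nonneg (d - 1)]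
  have h0 : 0 ≤ i := le_trans (mul_self_nonneg d) h
  omega

def is_prime_trial (i : Int) : Bool := trialLoop i 2

def happy_primes_alt (n : Int) : List Bool :=
  -- [True] * (n+1); prime[1] = False; prime[0] = False (IndexError for n < 1: excluded by Pre_)
  -- for i in range(2, n+1): prime[i] = _is_prime(i) and is_happy(i)   (i ≥ 2, so .toNat is exact)
  (PySem.List.pyRange 2 (n + 1) 1).foldl
    (fun pr i => pr.set i.toNat (is_prime_trial i && is_happy i))
    (((PySem.List.pyRepeat [true] (n + 1)).set 1 false).set 0 false)

-- ===== PRECONDITION & SPEC =====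
-- Python A (and B alike) raises IndexError on n < 1: [True]*(n+1) has no index 1 there.
def Pre_happy_primes (n : Int) : Prop := 1 ≤ n
instance (n : Int) : Decidable (Pre_happy_primes n) := by unfold Pre_happy_primes; infer_instance
def pvWitness_happy_primes : Int := 7

def Spec_happy_primes (n : Int) (out : List Bool) : Prop := out = happy_primes_alt n
instance (n : Int) (out : List Bool) : Decidable (Spec_happy_primes n out) := by unfold Spec_happy_primes; infer_instance

-- ===== CLAIM (what is proved, stated in full; the proofs are below) =====
def Claim_equal_happy_primes : Prop :=
  ∀ (n : Int), Dom_happy_primes n → Pre_happy_primes n → Spec_happy_primes n (happy_primes n)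

-- ===== LEMMAS AND PROOFS =====

-- "k is 0, 1, or has a nontrivial divisor below p" — what the sieve has marked false by outer counter p
def markedB (p : Int) (k : Nat) : Bool :=
  decide (k < 2 ∨ ∃ d : Nat, d < p.toNat ∧ 2 ≤ d ∧ d ∣ k ∧ d ≠ k)

-- "k is 0, 1, or composite"
def compB (k : Nat) : Bool :=
  decide (k < 2 ∨ ∃ d : Nat, d < k ∧ 2 ≤ d ∧ d ∣ k)

lemma small_factor_iff (k : Nat) (hk : 2 ≤ k) :
    (∃ d : Nat, 2 ≤ d ∧ d * d ≤ k ∧ d ∣ k) ↔ (∃ d : Nat, d < k ∧ 2 ≤ d ∧ d ∣ k) := by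
  constructor
  · rintro ⟨d, hd2, hdd, hdvd⟩
    exact ⟨d, by nlinarith, hd2, hdvd⟩
  · rintro ⟨d, hdk, hd2, hdvd⟩
    have hk0 : 0 < k := by omega
    have hdk' : d * (k / d) = k := Nat.mul_div_cancel' hdvd
    have hq2 : 2 ≤ k / d := by
      rcases Nat.lt_or_ge (k / d) 2 with h | h
      · interval_cases h' : (k / d) <;> omega
      · exact h
    rcases Nat.le_total d (k / d) with h | h
    · exact ⟨d, hd2, by nlinarith, hdvd⟩
    · exact ⟨k / d, hq2, by nlinarith, Nat.div_dvd_of_dvd hdvd⟩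

lemma length_foldl_set {α : Type} (g : α → Nat) (v : α → Bool) (js : List α) (l : List Bool) :
    (js.foldl (fun pr x => pr.set (g x) (v x)) l).length = l.length := by
  induction js generalizing l with
  | nil => rfl
  | cons j js ih => simp [List.foldl_cons, ih]

lemma foldl_set_false_getElem? {α : Type} (g : α → Nat) (js : List α) (l : List Bool) (k : Nat) :
    (js.foldl (fun pr x => pr.set (g x) false) l)[k]? =
      if ∃ x ∈ js, g x = k then (if k < l.length then some false else none) else l[k]? := by
  induction js generalizing l with
  | nil => simp
  | cons j js ih =>
    rw [List.foldl_cons, ih]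
    simp only [List.length_set]
    by_cases hj : g j = k
    · by_cases hm : ∃ x ∈ js, g x = k
      · simp [hm, hj]
      · simp only [hm, if_false]
        rw [List.getElem?_set, if_pos hj]
        simp [hj]
    · by_cases hm : ∃ x ∈ js, g x = k
      · simp [hm, hj]
      · simp only [hm, if_false]
        rw [List.getElem?_set, if_neg hj]
        simp [hj, hm]

lemma foldl_set_f_getElem?_of_not_mem {α : Type} (g : α → Nat) (v : α → Bool) (js : List α)
    (l : List Bool) (k : Nat) (h : ∀ x ∈ js, g x ≠ k) :
    (js.foldl (fun pr x => pr.set (g x) (v x)) l)[k]? = l[k]? := by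
  induction js generalizing l with
  | nil => rfl
  | cons j js ih =>
    rw [List.foldl_cons, ih _ (fun x hx => h x (List.mem_cons_of_mem _ hx)),
      List.getElem?_set, if_neg (h j (List.mem_cons_self ..))]

lemma foldl_set_f_getElem?_of_mem {α : Type} (g : α → Nat) (v : α → Bool) (k : Nat) :
    ∀ (js : List α), (∀ x ∈ js, ∀ y ∈ js, g x = g y → v x = v y) →
    ∀ x ∈ js, g x = k → ∀ (l : List Bool),
    (js.foldl (fun pr x => pr.set (g x) (v x)) l)[k]? =
      if k < l.length then some (v x) else none := by
  intro js
  induction js with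
  | nil => intro _ x hx; simp at hx
  | cons j js ih =>
    intro hinj x hx hgx l
    rw [List.foldl_cons]
    by_cases hm : ∃ y ∈ js, g y = k
    · obtain ⟨y, hy, hgy⟩ := hm
      rw [ih (fun a ha b hb => hinj a (List.mem_cons_of_mem _ ha) b (List.mem_cons_of_mem _ hb))
            y hy hgy, List.length_set]
      have : v y = v x := hinj y (List.mem_cons_of_mem _ hy) x hx (hgy.trans hgx.symm)
      rw [this]
    · have hjx : x = j := by
        rcases List.mem_cons.mp hx with rfl | hx'
        · rfl
        · exact absurd ⟨x, hx', hgx⟩ hm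
      subst hjx
      rw [foldl_set_f_getElem?_of_not_mem _ _ _ _ _ (fun y hy hgy => hm ⟨y, hy, hgy⟩),
        List.getElem?_set, if_pos hgx]
      simp [hgx]

-- membership in the marking range, in Nat terms
lemma mem_mark_range_iff (n p : Int) (hp : 2 ≤ p) (k : Nat) (hk : (k : Int) < n + 1) :
    (∃ x ∈ PySem.List.pyRange (p * 2) (n + 1) p, x.toNat = k) ↔
      (2 * p.toNat ≤ k ∧ p.toNat ∣ k) := by
  constructor
  · rintro ⟨x, hx, rfl⟩
    rw [PySem.List.mem_pyRange_iff_of_pos (by omega)] at hx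
    obtain ⟨h1, h2, h3⟩ := hx
    have hx0 : 0 ≤ x := by omega
    have hpd : p ∣ x := (dvd_sub_left (dvd_mul_right p 2)).mp h3
    constructor
    · omega
    · obtain ⟨c, hc⟩ := hpd
      have hc0 : 0 ≤ c := by nlinarith
      have hp1 : (p.toNat : Int) = p := Int.toNat_of_nonneg (by omega)
      have hc1 : (c.toNat : Int) = c := Int.toNat_of_nonneg hc0
      refine ⟨c.toNat, ?_⟩
      have hcast : ((x.toNat : Nat) : Int) = ((p.toNat * c.toNat : Nat) : Int) := by
        push_cast
        rw [hp1, hc1]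
        omega
      exact_mod_cast hcast
  · rintro ⟨h1, h2⟩
    refine ⟨(k : Int), ?_, by omega⟩
    rw [PySem.List.mem_pyRange_iff_of_pos (by omega)]
    refine ⟨by omega, hk, ?_⟩
    apply (dvd_sub_left (dvd_mul_right p 2)).mpr
    obtain ⟨c, hc⟩ := h2
    refine ⟨(c : Int), ?_⟩
    have hp1 : (p.toNat : Int) = p := Int.toNat_of_nonneg (by omega)
    have hcast : ((k : Nat) : Int) = ((p.toNat * c : Nat) : Int) := by
      exact_mod_cast congrArg (Nat.cast : Nat → Int) hc
    push_cast at hcast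
    rw [hp1] at hcast
    exact hcast

lemma markedB_succ_of_marked (p : Int) (hp : 2 ≤ p) (hm : markedB p p.toNat = true) (k : Nat) :
    markedB (p + 1) k = markedB p k := by
  unfold markedB at *
  rw [decide_eq_true_eq] at hm
  rcases hm with hm | hm
  · omega
  obtain ⟨d0, hd0p, hd02, hd0dvd, hd0ne⟩ := hm
  have hps : (p + 1).toNat = p.toNat + 1 := by omega
  rw [hps]
  congr 1
  apply propext
  constructor
  · rintro (h | ⟨d, hdp, hd2, hdvd, hdne⟩)
    · exact Or.inl h
    · by_cases hk2 : k < 2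
      · exact Or.inl hk2
      rcases Nat.lt_or_ge d p.toNat with h | h
      · exact Or.inr ⟨d, h, hd2, hdvd, hdne⟩
      · have hdP : d = p.toNat := by omega
        have hk2d : 2 * d ≤ k := by
          obtain ⟨c, hc⟩ := hdvd
          rcases c with _ | _ | c
          · omega
          · omega
          · subst hc; nlinarith
        have hd0d : d0 ∣ d := hdP ▸ hd0dvd
        exact Or.inr ⟨d0, hd0p, hd02, hd0d.trans hdvd, by omega⟩
  · rintro (h | ⟨d, hdp, hd2, hdvd, hdne⟩)
    · exact Or.inl h
    · exact Or.inr ⟨d, by omega, hd2, hdvd, hdne⟩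

lemma markedB_succ_of_unmarked (n p : Int) (hp : 2 ≤ p) (k : Nat) (hk : (k : Int) < n + 1) :
    markedB (p + 1) k = true ↔
      ((∃ x ∈ PySem.List.pyRange (p * 2) (n + 1) p, x.toNat = k) ∨ markedB p k = true) := by
  rw [mem_mark_range_iff n p hp k hk]
  unfold markedB
  rw [decide_eq_true_eq, decide_eq_true_eq]
  have hps : (p + 1).toNat = p.toNat + 1 := by omega
  rw [hps]
  constructor
  · rintro (h | ⟨d, hdp, hd2, hdvd, hdne⟩)
    · exact Or.inr (Or.inl h)
    · by_cases hk2 : k < 2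
      · exact Or.inr (Or.inl hk2)
      rcases Nat.lt_or_ge d p.toNat with h | h
      · exact Or.inr (Or.inr ⟨d, h, hd2, hdvd, hdne⟩)
      · have hdP : d = p.toNat := by omega
        have hk2d : 2 * d ≤ k := by
          obtain ⟨c, hc⟩ := hdvd
          rcases c with _ | _ | c
          · omega
          · omega
          · subst hc; nlinarith
        exact Or.inl ⟨by omega, hdP ▸ hdvd⟩
  · rintro (⟨h1, h2⟩ | h | ⟨d, hdp, hd2, hdvd, hdne⟩)
    · exact Or.inr ⟨p.toNat, by omega, by omega, h2, by omega⟩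
    · exact Or.inl h
    · exact Or.inr ⟨d, by omega, hd2, hdvd, hdne⟩

lemma markedB_exit (n p : Int) (hp : 2 ≤ p) (hgt : ¬ p * p ≤ n) (k : Nat)
    (hk : (k : Int) < n + 1) : markedB p k = compB k := by
  unfold markedB compB
  congr 1
  apply propext
  constructor
  · rintro (h | ⟨d, hdp, hd2, hdvd, hdne⟩)
    · exact Or.inl h
    · by_cases hk2 : k < 2
      · exact Or.inl hk2
      have : d ≤ k := Nat.le_of_dvd (by omega) hdvd
      exact Or.inr ⟨d, by omega, hd2, hdvd⟩
  · rintro (h | hcomp)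
    · exact Or.inl h
    · by_cases hk2 : k < 2
      · exact Or.inl hk2
      obtain ⟨d, hd2, hdd, hdvd⟩ := (small_factor_iff k (by omega)).mpr hcomp
      have hdk : d < k := by nlinarith
      have hdint : (d : Int) * d ≤ n := by
        have : (d : Int) * d ≤ (k : Int) := by exact_mod_cast hdd
        omega
      have hdp' : (d : Int) < p := by nlinarith
      exact Or.inr ⟨d, by omega, hd2, hdvd, by omega⟩

lemma length_sieveLoop (n p : Int) (l : List Bool) : (sieveLoop n p l).length = l.length := by
  induction p, l using sieveLoop.induct (n := n) with
  | case1 p l hle ih =>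
    rw [sieveLoop, dif_pos hle]
    simp only [← dite_eq_ite]
    rw [ih]
    split
    · exact length_foldl_set (fun i : Int => i.toNat) (fun _ => false) _ _
    · rfl
  | case2 p l hgt => rw [sieveLoop, dif_neg hgt]

lemma sieveLoop_getElem? (n : Int) (hn : 1 ≤ n) :
    ∀ (p : Int) (l : List Bool), 2 ≤ p → l.length = (n + 1).toNat →
    (∀ k < (n + 1).toNat, l[k]? = some (!markedB p k)) →
    ∀ k < (n + 1).toNat, (sieveLoop n p l)[k]? = some (!compB k) := by
  intro p l
  induction p, l using sieveLoop.induct (n := n) with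
  | case1 p l hle ih =>
    intro hp hlen hinv k hk
    rw [sieveLoop, dif_pos hle]
    have hpn : p ≤ n := by nlinarith
    have hPN : p.toNat < (n + 1).toNat := by omega
    have hgetd : l.getD p.toNat false = !markedB p p.toNat := by
      rw [List.getD_eq_getElem?_getD, hinv p.toNat hPN]; rfl
    by_cases hm : markedB p p.toNat = true
    · have hker : (if h : l.getD p.toNat false = true then sieveMark n p l else l) = l := by
        rw [dif_neg]; rw [hgetd, hm]; simp
      rw [show (if l.getD p.toNat false then sieveMark n p l else l) = l by
            rw [hgetd, hm]; simp]
      rw [hker] at ih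
      exact ih (by omega) hlen
        (fun k' hk' => by rw [hinv k' hk', markedB_succ_of_marked p hp hm k']) k hk
    · have hmf : markedB p p.toNat = false := by simp [Bool.not_eq_true] at hm; exact hm
      have hker : (if h : l.getD p.toNat false = true then sieveMark n p l else l)
          = sieveMark n p l := by
        rw [dif_pos]; rw [hgetd, hmf]; simp
      rw [show (if l.getD p.toNat false then sieveMark n p l else l) = sieveMark n p l by
            rw [hgetd, hmf]; simp]
      rw [hker] at ih
      refine ih (by omega) ?_ ?_ k hk
      · rw [sieveMark]
        rw [length_foldl_set (fun i : Int => i.toNat) (fun _ => false), hlen]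
      · intro k' hk'
        rw [sieveMark, foldl_set_false_getElem? (fun i : Int => i.toNat)]
        have hk'int : (k' : Int) < n + 1 := by omega
        by_cases hmem : ∃ x ∈ PySem.List.pyRange (p * 2) (n + 1) p, x.toNat = k'
        · rw [if_pos hmem, if_pos (by omega)]
          have : markedB (p + 1) k' = true :=
            (markedB_succ_of_unmarked n p hp k' hk'int).mpr (Or.inl hmem)
          rw [this]; rfl
        · rw [if_neg hmem, hinv k' hk']
          congr 1
          by_cases hm' : markedB p k' = true
          · rw [hm', (markedB_succ_of_unmarked n p hp k' hk'int).mpr (Or.inr hm')]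
          · have h1 : markedB p k' = false := by simpa using hm'
            have h2 : markedB (p + 1) k' = false := by
              by_contra hcon
              have htrue : markedB (p + 1) k' = true := by simpa using hcon
              rcases (markedB_succ_of_unmarked n p hp k' hk'int).mp htrue with h' | h'
              · exact hmem h'
              · exact hm' h'
            rw [h1, h2]
  | case2 p l hgt =>
    intro hp hlen hinv k hk
    rw [sieveLoop, dif_neg hgt, hinv k hk,
      markedB_exit n p hp hgt k (by omega)]

lemma trialLoop_eq_true_iff (i d : Int) (hd : 0 ≤ d) :
    trialLoop i d = true ↔ (∀ e : Int, d ≤ e → e * e ≤ i → ¬ e ∣ i) := by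
  revert hd
  induction d using trialLoop.induct (i := i) with
  | case1 d hle hmod =>
    intro hd
    rw [trialLoop, dif_pos hle, if_pos hmod]
    simp only [Bool.false_eq_true, false_iff]
    intro H
    exact (H d (le_refl d) hle)
      (by rwa [← PySem.Int.mod_eq_zero_iff_dvd, ← beq_iff_eq (b := (0 : Int))])
  | case2 d hle hmod ih =>
    intro hd
    rw [trialLoop, dif_pos hle, if_neg hmod]
    rw [ih (by omega)]
    constructor
    · intro H e he hee
      rcases eq_or_lt_of_le he with rfl | hlt
      · rw [← PySem.Int.mod_eq_zero_iff_dvd]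
        intro hc; exact hmod (by simp [hc])
      · exact H e (by omega) hee
    · intro H e he hee
      exact H e (by omega) hee
  | case3 d hgt =>
    intro hd
    rw [trialLoop, dif_neg hgt]
    simp only [true_iff]
    intro e he hee hdvd
    have : d * d ≤ e * e := by nlinarith
    omega

lemma is_prime_trial_eq (k : Nat) (hk : 2 ≤ k) : is_prime_trial (k : Int) = !compB k := by
  have h := trialLoop_eq_true_iff (k : Int) 2 (by omega)
  have hnat : (∀ e : Int, 2 ≤ e → e * e ≤ (k : Int) → ¬ e ∣ (k : Int)) ↔
      (∀ d : Nat, 2 ≤ d → d * d ≤ k → ¬ d ∣ k) := by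
    constructor
    · intro H d hd2 hdd hdvd
      exact H (d : Int) (by exact_mod_cast hd2) (by exact_mod_cast hdd)
        (by exact_mod_cast hdvd)
    · intro H e he2 hee hdvd
      have he0 : 0 ≤ e := by omega
      have : e = ((e.toNat : Nat) : Int) := by omega
      rw [this] at hee hdvd
      exact H e.toNat (by omega) (by exact_mod_cast hee) (by exact_mod_cast hdvd)
  unfold is_prime_trial compB
  by_cases hc : (k < 2 ∨ ∃ d : Nat, d < k ∧ 2 ≤ d ∧ d ∣ k)
  · rw [decide_eq_true hc, Bool.not_true]
    cases htl : trialLoop (k : Int) 2 with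
    | false => rfl
    | true =>
      exfalso
      rcases hc with hc | hc
      · omega
      · obtain ⟨d, hd2, hdd, hdvd⟩ :=
          (small_factor_iff k hk).mpr (by obtain ⟨d, h1, h2, h3⟩ := hc; exact ⟨d, h1, h2, h3⟩)
        exact (hnat.mp (h.mp htl)) d hd2 hdd hdvd
  · rw [decide_eq_false hc, Bool.not_false]
    rw [h, hnat]
    intro d hd2 hdd hdvd
    exact hc (Or.inr ((small_factor_iff k hk).mp ⟨d, hd2, hdd, hdvd⟩))

lemma length_initPrimes (n : Int) : (initPrimes n).length = (n + 1).toNat := by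
  unfold initPrimes
  simp [PySem.List.length_pyRange_one]

lemma initPrimes_getElem? (n : Int) (k : Nat) (hk : k < (n + 1).toNat) :
    (initPrimes n)[k]? = some (!markedB 2 k) := by
  have hm2 : markedB 2 k = decide (k < 2) := by
    unfold markedB
    rw [decide_eq_decide]
    constructor
    · rintro (h | ⟨d, h1, h2, _⟩)
      · exact h
      · omega
    · exact Or.inl
  rw [hm2]
  unfold initPrimes
  have hlenm : (((PySem.List.pyRange 0 (n + 1) 1).map (fun _ => true)).set 1 false).length
      = (n + 1).toNat := by simp [PySem.List.length_pyRange_one]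
  have hlen0 : ((PySem.List.pyRange 0 (n + 1) 1).map (fun _ => true)).length = (n + 1).toNat := by
    simp [PySem.List.length_pyRange_one]
  rw [List.getElem?_set]
  by_cases h0 : 0 = k
  · rw [if_pos h0, if_pos (by omega)]
    subst h0; rfl
  · rw [if_neg h0, List.getElem?_set]
    by_cases h1 : 1 = k
    · rw [if_pos h1, if_pos (by omega)]
      subst h1; rfl
    · rw [if_neg h1, List.getElem?_eq_getElem (by omega)]
      simp only [List.getElem_map]
      have : decide (k < 2) = false := by simp; omega
      rw [this]; rfl

lemma happyPass_getElem? (l : List Bool) (k : Nat) (hk : k < l.length) :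
    (happyPass l)[k]? = some (l[k] && is_happy (k : Int)) := by
  unfold happyPass
  simp only [PySem.List.foldl_if_eq_foldl_filter]
  rw [foldl_set_false_getElem? (fun ip : Int × Bool => ip.1.toNat)]
  by_cases hcond : (l[k] && !is_happy (k : Int)) = true
  · rw [if_pos, if_pos hk]
    · rcases Bool.and_eq_true .. |>.mp hcond with ⟨hb, hh⟩
      rw [hb, Bool.true_and]
      simp only [Bool.not_eq_true'] at hh
      rw [hh]
    · refine ⟨((0 : Int) + (k : Int), l[k]), ?_, by simp⟩
      rw [List.mem_filter]
      constructor
      · exact (PySem.List.mem_enumerate_iff l 0 _).mpr ⟨k, hk, rfl⟩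
      · simpa using hcond
  · rw [if_neg]
    · rw [List.getElem?_eq_getElem hk]
      congr 1
      by_cases hb : l[k] = true
      · rw [hb, Bool.true_and] at hcond ⊢
        simp only [Bool.not_eq_true', Bool.not_eq_false] at hcond
        rw [hcond]
      · have hb' : l[k] = false := by simpa using hb
        rw [hb']
        simp
    · rintro ⟨ip, hmem, htn⟩
      rw [List.mem_filter] at hmem
      obtain ⟨hmem, hpred⟩ := hmem
      obtain ⟨k', hk', rfl⟩ := (PySem.List.mem_enumerate_iff l 0 _).mp hmem
      have hkk : k' = k := by simpa using htn
      subst hkk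
      apply hcond
      simpa using hpred

lemma length_happy_primes (n : Int) : (happy_primes n).length = (initPrimes n).length := by
  unfold happy_primes happyPass
  simp only [PySem.List.foldl_if_eq_foldl_filter]
  rw [length_foldl_set (fun ip : Int × Bool => ip.1.toNat) (fun _ => false),
    length_sieveLoop]

lemma happy_primes_getElem? (n : Int) (hn : 1 ≤ n) (k : Nat) (hk : k < (n + 1).toNat) :
    (happy_primes n)[k]? = some (!compB k && is_happy (k : Int)) := by
  have hsieve : (sieveLoop n 2 (initPrimes n))[k]? = some (!compB k) :=
    sieveLoop_getElem? n hn 2 (initPrimes n) (by omega) (length_initPrimes n)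
      (fun k' hk' => initPrimes_getElem? n k' hk') k hk
  have hslen : (sieveLoop n 2 (initPrimes n)).length = (n + 1).toNat := by
    rw [length_sieveLoop, length_initPrimes]
  unfold happy_primes
  rw [happyPass_getElem? _ k (by omega)]
  congr 2
  have := List.getElem?_eq_getElem (l := sieveLoop n 2 (initPrimes n)) (i := k) (by omega)
  rw [this] at hsieve
  exact Option.some.inj hsieve

lemma length_happy_primes_alt (n : Int) :
    (happy_primes_alt n).length = (n + 1).toNat := by
  unfold happy_primes_alt
  rw [length_foldl_set (fun i : Int => i.toNat) (fun i => is_prime_trial i && is_happy i)]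
  simp [PySem.List.pyRepeat_singleton]

lemma happy_primes_alt_getElem? (n : Int) (hn : 1 ≤ n) (k : Nat) (hk : k < (n + 1).toNat) :
    (happy_primes_alt n)[k]? = some (!compB k && is_happy (k : Int)) := by
  unfold happy_primes_alt
  rw [PySem.List.pyRepeat_singleton]
  have hblen : (((List.replicate (n + 1).toNat true).set 1 false).set 0 false).length
      = (n + 1).toNat := by simp
  by_cases hk2 : k < 2
  · rw [foldl_set_f_getElem?_of_not_mem]
    · rw [List.getElem?_set]
      have hcomp : compB k = true := by unfold compB; exact decide_eq_true (Or.inl hk2)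
      have hk01 : k = 0 ∨ k = 1 := by omega
      rcases hk01 with rfl | rfl
      · rw [if_pos rfl, if_pos (by simp; omega), hcomp]; rfl
      · rw [if_neg (by omega), List.getElem?_set, if_pos rfl, if_pos (by simp; omega), hcomp]
        rfl
    · intro x hxm
      rw [PySem.List.mem_pyRange_one] at hxm
      omega
  · rw [foldl_set_f_getElem?_of_mem (fun i : Int => i.toNat)
        (fun i => is_prime_trial i && is_happy i) k _
        (fun x hx y hy hxy => by
          rw [PySem.List.mem_pyRange_one] at hx hy
          have hxy' : x.toNat = y.toNat := hxy
          have : x = y := by omega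
          rw [this])
        ((k : Nat) : Int)
        (by rw [PySem.List.mem_pyRange_one]; omega)
        (by simp)]
    rw [hblen, if_pos (by omega), is_prime_trial_eq k (by omega)]

-- ===== VERDICT (by name: the statement is the Claim_ definition above) =====
theorem happy_primes_spec : Claim_equal_happy_primes := by
  intro n _ hn
  unfold Spec_happy_primes
  apply List.ext_getElem?
  intro k
  by_cases hk : k < (n + 1).toNat
  · rw [happy_primes_getElem? n hn k hk, happy_primes_alt_getElem? n hn k hk]
  · rw [List.getElem?_eq_none (by rw [length_happy_primes n, length_initPrimes]; omega),
        List.getElem?_eq_none (by rw [length_happy_primes_alt n]; omega)]
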